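-- pv_equiv track=rewrite | github.com/the-shadow-0/DSA-Python | algorithms/data_structures/array_ops.py | array_insert
-- ===== SOURCE A (Python) =====
-- from typing import List, Any, Optional
--
-- def array_insert(arr: List[Any], index: int, value: Any) -> List[Any]:
--     """
--     Insert a value at a specific index, shifting elements right.
--
--     Time Complexity:  O(n) — must shift elements after index
--     Space Complexity: O(1) — in-place modification
--
--     Steps:
--         1. Validate the index
--         2. Shift all elements from index onward one position right
--         3. Place the new value at the index
--     """
--     # Step 1: Validate index
--     if index < 0 or index > len(arr):
--         raise IndexError(f"Index {index} out of range for array of length {len(arr)}")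
--
--     # Step 2: Append a placeholder and shift elements right
--     arr.append(None)
--     for i in range(len(arr) - 1, index, -1):
--         arr[i] = arr[i - 1]
--
--     # Step 3: Insert the value
--     arr[index] = value
--     return arr
-- ===== SOURCE B (Python) =====
-- def array_insert(arr, index, value):
--     if index < 0 or index > len(arr):
--         raise IndexError(f"Index {index} out of range for array of length {len(arr)}")
--     # Rebuild contents by slice concatenation, assigned in place so the
--     # same list object is mutated and returned (as in A).
--     arr[:] = arr[:index] + [value] + arr[index:]
--     return arr
-- ===== Notes on version B (the rewrite author's own statement) =====
-- stated objective: simpler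
-- what changed: Replaces the append-placeholder-then-shift-right-in-a-descending-loop body with a single in-place slice-concatenation rebuild arr[:] = arr[:index] + [value] + arr[index:], keeping the exact IndexError validation and the in-place mutation of the same list object.
import Mathlib
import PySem

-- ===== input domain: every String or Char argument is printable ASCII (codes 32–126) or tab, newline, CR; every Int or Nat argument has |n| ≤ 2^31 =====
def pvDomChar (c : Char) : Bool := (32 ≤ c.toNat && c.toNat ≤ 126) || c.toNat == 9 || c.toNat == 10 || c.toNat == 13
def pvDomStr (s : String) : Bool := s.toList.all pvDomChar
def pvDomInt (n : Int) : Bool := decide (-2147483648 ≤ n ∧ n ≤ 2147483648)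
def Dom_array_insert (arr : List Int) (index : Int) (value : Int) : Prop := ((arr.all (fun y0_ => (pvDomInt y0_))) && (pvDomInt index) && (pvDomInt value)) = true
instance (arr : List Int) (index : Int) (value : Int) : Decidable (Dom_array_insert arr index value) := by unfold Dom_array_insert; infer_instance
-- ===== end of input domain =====

-- B rebuilds the list by in-place slice concatenation instead of A's append-placeholder-and-shift
-- descending loop; same IndexError validation; equivalence is about the return value.

-- ===== PORT A =====
-- A: validate, append a placeholder (None; under Pre_ it is always overwritten, ported as 0),
-- shift elements right with a descending loop, write value at index.
def array_insert (arr : List Int) (index : Int) (value : Int) : List Int :=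
  if index < 0 ∨ index > (arr.length : Int) then arr  -- Python raises IndexError here; excluded by Pre_
  else
    let a := arr ++ [0]
    let a := (PySem.List.pyRange ((a.length : Int) - 1) index (-1)).foldl
      (fun s i => PySem.List.pySetD s i (PySem.List.pyGetD s (i - 1) 0)) a
    PySem.List.pySetD a index value

-- ===== PORT B =====
-- B: same validation, then arr[:index] + [value] + arr[index:].
def array_insert_alt (arr : List Int) (index : Int) (value : Int) : List Int :=
  if index < 0 ∨ index > (arr.length : Int) then arr  -- Python raises IndexError here; excluded by Pre_
  else PySem.List.slice arr none (some index) ++ [value] ++ PySem.List.slice arr (some index) none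

-- ===== PRECONDITION & SPEC =====
-- Exactly the inputs on which A returns normally (otherwise it raises IndexError).
def Pre_array_insert (arr : List Int) (index : Int) (value : Int) : Prop :=
  0 ≤ index ∧ index ≤ (arr.length : Int)
instance (arr : List Int) (index : Int) (value : Int) : Decidable (Pre_array_insert arr index value) := by unfold Pre_array_insert; infer_instance
def pvWitness_array_insert : List Int × Int × Int := ([1, 2, 3], 1, 9)

def Spec_array_insert (arr : List Int) (index : Int) (value : Int) (out : List Int) : Prop := out = array_insert_alt arr index value
instance (arr : List Int) (index : Int) (value : Int) (out : List Int) : Decidable (Spec_array_insert arr index value out) := by unfold Spec_array_insert; infer_instance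

-- ===== CLAIM (what is proved, stated in full; the proofs are below) =====
def Claim_equal_array_insert : Prop := ∀ (arr : List Int) (index : Int) (value : Int), Dom_array_insert arr index value → Pre_array_insert arr index value → Spec_array_insert arr index value (array_insert arr index value)

-- ===== LEMMAS AND PROOFS =====

-- The shifting loop invariant: after processing indices down to k+1, the state is
-- arr.take j ++ [arr.getD j 0] ++ arr.drop j for j = k.
theorem array_insert_shift (arr : List Int) (k j : Nat) (hk : k ≤ j) (hj : j ≤ arr.length) :
    (PySem.List.pyRange (j : Int) (k : Int) (-1)).foldl
      (fun s i => PySem.List.pySetD s i (PySem.List.pyGetD s (i - 1) 0))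
      (arr.take j ++ [arr.getD j 0] ++ arr.drop j)
    = arr.take k ++ [arr.getD k 0] ++ arr.drop k := by
  induction j with
  | zero =>
    interval_cases k
    simp [PySem.List.pyRange_neg_one_eq_nil]
  | succ j ih =>
    rcases Nat.eq_or_lt_of_le hk with h | h
    · subst h
      simp [PySem.List.pyRange_neg_one_eq_nil]
    · have hkj : k ≤ j := by omega
      have hjl : j < arr.length := by omega
      rw [show ((j + 1 : Nat) : Int) = ((j : Nat) : Int) + 1 by push_cast; ring]
      rw [PySem.List.pyRange_neg_one_cons (by exact_mod_cast by omega)]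
      rw [List.foldl_cons]
      have hstep :
          PySem.List.pySetD (arr.take (j+1) ++ [arr.getD (j+1) 0] ++ arr.drop (j+1))
            ((j : Int) + 1)
            (PySem.List.pyGetD (arr.take (j+1) ++ [arr.getD (j+1) 0] ++ arr.drop (j+1))
              ((j : Int) + 1 - 1) 0)
          = arr.take j ++ [arr.getD j 0] ++ arr.drop j := by
        have h1 : ((j : Int) + 1 - 1) = ((j : Nat) : Int) := by ring
        have hget : PySem.List.pyGetD (arr.take (j+1) ++ [arr.getD (j+1) 0] ++ arr.drop (j+1))
            ((j : Int) + 1 - 1) 0 = arr[j] := by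
          rw [h1, PySem.List.pyGetD_natCast]
          rw [List.getD_eq_getElem?_getD]
          rw [List.append_assoc, List.getElem?_append_left (by
            simpa using Nat.lt_of_lt_of_le hjl (le_refl _))]
          simp [hjl]
        rw [hget]
        have h2 : ((j : Int) + 1) = (((j + 1 : Nat)) : Int) := by push_cast; ring
        rw [h2, PySem.List.pySetD_natCast]
        -- set position j+1 = first element after take (j+1)
        have hlen : (arr.take (j+1)).length = j + 1 := by
          simp [Nat.min_eq_left (by omega : j + 1 ≤ arr.length)]
        rw [List.append_assoc, List.set_append_right _ _ (by omega)]
        rw [hlen]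
        simp only [Nat.sub_self]
        have htake : arr.take (j+1) = arr.take j ++ [arr[j]] := by
          rw [List.take_add_one]
          simp [List.getElem?_eq_getElem hjl]
        have hdrop : arr.drop j = arr[j] :: arr.drop (j+1) := List.drop_eq_getElem_cons hjl
        have hgd : arr.getD j 0 = arr[j] := by
          simp [List.getD_eq_getElem?_getD, List.getElem?_eq_getElem hjl]
        rw [htake, hdrop, hgd]
        simp
      rw [hstep, show ((j : Int) + 1 - 1) = ((j : Nat) : Int) by ring]
      exact ih hkj (by omega)

theorem array_insert_spec : Claim_equal_array_insert := by
  intro arr index value _ hpre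
  obtain ⟨h0, hle⟩ := hpre
  unfold Spec_array_insert array_insert array_insert_alt
  rw [if_neg (by omega), if_neg (by omega)]
  obtain ⟨k, rfl⟩ := Int.eq_ofNat_of_zero_le h0
  have hk : k ≤ arr.length := by exact_mod_cast hle
  simp only []
  have hlen : ((arr ++ [0]).length : Int) - 1 = (arr.length : Int) := by simp
  rw [hlen]
  have hinit : arr ++ [0] = arr.take arr.length ++ [arr.getD arr.length 0] ++ arr.drop arr.length := by
    simp [List.getD_eq_getElem?_getD]
  rw [hinit, array_insert_shift arr k arr.length hk (le_refl _)]
  rw [PySem.List.pySetD_natCast]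
  rw [PySem.List.slice_to_natCast, PySem.List.slice_from_natCast]
  rw [List.append_assoc, List.set_append_right _ _ (by simp [Nat.min_eq_left hk])]
  simp [Nat.min_eq_left hk]
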